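-- pv_equiv track=rewrite | github.com/FocusedConsistency/challenges-dailies | FCC_2026-02-23.py | score_curling
-- ===== SOURCE A (Python) =====
-- def score_curling(house):
--     def get_ring(i, j):
--         if i == 2 and j == 2:
--             return 0
--         elif max(abs(i - 2), abs(j - 2)) == 1:
--             return 1
--         else:
--             return 2
--
--     r_stones = []
--     y_stones = []
--     for i in range(5):
--         for j in range(5):
--             if house[i][j] == 'R':
--                 r_stones.append(get_ring(i, j))
--             elif house[i][j] == 'Y':
--                 y_stones.append(get_ring(i, j))
--
--     if min(r_stones) < min(y_stones):
--         points = sum(x < min(y_stones) for x in r_stones)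
--         return f'R: {points}'
--     elif min(r_stones) > min(y_stones):
--         points = sum(x < min(r_stones) for x in y_stones)
--         return f'Y: {points}'
--
--     return "No points awarded"
-- ===== SOURCE B (Python) =====
-- def score_curling(house):
--     # Walk the house ring by ring from the button outward, keeping only the
--     # current leader and its running score; stop as soon as the other colour
--     # shows up (note: get_ring is exactly the Chebyshev distance to the centre).
--     rings = [[(i, j) for i in range(5) for j in range(5)
--               if max(abs(i - 2), abs(j - 2)) == d] for d in range(3)]
--     leader, score = None, 0
--     for coords in rings:
--         cells = [house[i][j] for i, j in coords]
--         r, y = cells.count('R'), cells.count('Y')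
--         if leader is None:
--             if r and y:
--                 return 'No points awarded'
--             if r:
--                 leader, score = 'R', r
--             elif y:
--                 leader, score = 'Y', y
--         elif leader == 'R':
--             if y:
--                 break
--             score += r
--         else:
--             if r:
--                 break
--             score += y
--     if leader is None:
--         return 'No points awarded'
--     return f'{leader}: {score}'
-- ===== Notes on version B (the rewrite author's own statement) =====
-- stated objective: alternative
-- what changed: B traverses the house ring by ring from the button outward with a leader/score accumulator and early exit at the first opposing stone, instead of A's flat scan into per-stone ring-value lists followed by min and counting passes; no minimum is ever computed.
import Mathlib
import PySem

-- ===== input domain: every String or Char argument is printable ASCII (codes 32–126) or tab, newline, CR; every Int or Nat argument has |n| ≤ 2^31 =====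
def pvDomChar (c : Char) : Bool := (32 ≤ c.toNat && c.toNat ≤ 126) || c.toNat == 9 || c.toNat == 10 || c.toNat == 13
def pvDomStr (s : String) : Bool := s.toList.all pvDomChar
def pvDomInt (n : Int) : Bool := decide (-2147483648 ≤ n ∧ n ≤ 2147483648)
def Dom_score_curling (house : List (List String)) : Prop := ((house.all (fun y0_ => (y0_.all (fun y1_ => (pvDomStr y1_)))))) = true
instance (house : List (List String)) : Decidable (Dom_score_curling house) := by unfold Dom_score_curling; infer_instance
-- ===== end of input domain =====

-- B walks the house ring by ring from the button outward with a leader/score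
-- accumulator and early exit, instead of A's flat scan into per-stone ring lists
-- with min/count passes — alternative traversal, same cost; RETURN value equivalence on Pre_.

-- ===== PORT A =====
-- A's get_ring helper
def pvRingA (i j : Int) : Int :=
  if i = 2 ∧ j = 2 then 0
  else if max |i - 2| |j - 2| = 1 then 1 else 2

def score_curling (house : List (List String)) : String :=
  let st := (PySem.List.pyRange 0 5 1).foldl (fun (acc : List Int × List Int) i =>
    (PySem.List.pyRange 0 5 1).foldl (fun (acc : List Int × List Int) j =>
      let cell := PySem.List.pyGetD (PySem.List.pyGetD house i []) j ""
      if cell = "R" then (acc.1 ++ [pvRingA i j], acc.2)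
      else if cell = "Y" then (acc.1, acc.2 ++ [pvRingA i j])
      else acc) acc) ([], [])
  match PySem.List.min? st.1 (fun x => x), PySem.List.min? st.2 (fun x => x) with
  | some mr, some my =>
      if mr < my then "R: " ++ PySem.Int.toStr ((st.1.map (fun x => if x < my then (1 : Int) else 0)).sum)
      else if my < mr then "Y: " ++ PySem.Int.toStr ((st.2.map (fun x => if x < mr then (1 : Int) else 0)).sum)
      else "No points awarded"
  | _, _ => ""   -- min of an empty stone list raises ValueError in Python; excluded by Pre_

-- ===== PORT B =====
-- Source B's ring expression max(abs(i-2), abs(j-2))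
def pvRing (i j : Int) : Int := max |i - 2| |j - 2|

-- Source B's 'rings' comprehension: for each d, the (i, j) with Chebyshev distance d
def pvRingsB : List (List (Int × Int)) :=
  (PySem.List.pyRange 0 3 1).map (fun d =>
    (PySem.List.pyRange 0 5 1).flatMap (fun i =>
      ((PySem.List.pyRange 0 5 1).filter (fun j => pvRing i j == d)).map (fun j => (i, j))))

-- Source B's for-loop over the rings: state = (leader, score); a 'break' (or the
-- post-loop return) produces the final string with the current state
def pvScan (house : List (List String)) :
    List (List (Int × Int)) → Option (String × Int) → String
  | [], none => "No points awarded"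
  | [], some (c, s) => c ++ ": " ++ PySem.Int.toStr s
  | coords :: rest, st =>
      let cells := coords.map (fun p => PySem.List.pyGetD (PySem.List.pyGetD house p.1 []) p.2 "")
      let r : Int := (cells.count "R" : Int)
      let y : Int := (cells.count "Y" : Int)
      match st with
      | none =>
          if r ≠ 0 ∧ y ≠ 0 then "No points awarded"
          else if r ≠ 0 then pvScan house rest (some ("R", r))
          else if y ≠ 0 then pvScan house rest (some ("Y", y))
          else pvScan house rest none
      | some (c, s) =>
          if c = "R" then
            if y ≠ 0 then "R: " ++ PySem.Int.toStr s
            else pvScan house rest (some ("R", s + r))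
          else
            if r ≠ 0 then "Y: " ++ PySem.Int.toStr s
            else pvScan house rest (some ("Y", s + y))

def score_curling_alt (house : List (List String)) : String :=
  pvScan house pvRingsB none

-- ===== PRECONDITION & SPEC =====
-- Pre_ is exactly where A returns: the 5x5 region must be indexable (else IndexError)
-- and both an "R" and a "Y" cell must exist in it (else Python raises ValueError taking the min of an empty sequence).
def Pre_score_curling (house : List (List String)) : Prop :=
  5 ≤ house.length ∧ (∀ i < 5, 5 ≤ (house.getD i []).length) ∧
  (∃ i < 5, ∃ j < 5, (house.getD i []).getD j "" = "R") ∧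
  (∃ i < 5, ∃ j < 5, (house.getD i []).getD j "" = "Y")
instance (house : List (List String)) : Decidable (Pre_score_curling house) := by
  unfold Pre_score_curling; infer_instance

def pvWitness_score_curling : List (List String) :=
  [["Y", ".", ".", ".", "."],
   [".", ".", ".", ".", "."],
   [".", ".", "R", ".", "."],
   [".", ".", ".", ".", "."],
   [".", ".", ".", ".", "."]]

def Spec_score_curling (house : List (List String)) (out : String) : Prop := out = score_curling_alt house
instance (house : List (List String)) (out : String) : Decidable (Spec_score_curling house out) := by
  unfold Spec_score_curling; infer_instance

-- ===== CLAIM (what is proved, stated in full; the proofs are below) =====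
def Claim_equal_score_curling : Prop := ∀ (house : List (List String)), Dom_score_curling house → Pre_score_curling house → Spec_score_curling house (score_curling house)

-- ===== LEMMAS AND PROOFS =====

-- the 25 (i, j) cell coordinates, row-major, as A's nested loops visit them
def pvPairs : List (Int × Int) :=
  (PySem.List.pyRange 0 5 1).flatMap (fun i => (PySem.List.pyRange 0 5 1).map (fun j => (i, j)))

def pvCell (house : List (List String)) (p : Int × Int) : String :=
  PySem.List.pyGetD (PySem.List.pyGetD house p.1 []) p.2 ""

def pvStones (house : List (List String)) (c : String) : List Int :=
  ((pvPairs.filter (fun p => decide (pvCell house p = c))).map (fun p => pvRingA p.1 p.2))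

def pvStepA (house : List (List String)) :
    List Int × List Int → Int × Int → List Int × List Int := fun acc p =>
  if pvCell house p = "R" then (acc.1 ++ [pvRingA p.1 p.2], acc.2)
  else if pvCell house p = "Y" then (acc.1, acc.2 ++ [pvRingA p.1 p.2])
  else acc

lemma foldl_nested {σ : Type} (f : σ → Int × Int → σ) (l1 l2 : List Int) (init : σ) :
    l1.foldl (fun acc i => l2.foldl (fun acc j => f acc (i, j)) acc) init
    = (l1.flatMap (fun i => l2.map (fun j => (i, j)))).foldl f init := by
  induction l1 generalizing init with
  | nil => rfl
  | cons a t ih => simp [List.flatMap_cons, List.foldl_append, ih, List.foldl_map]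

lemma pvRingA_cases (i j : Int) : pvRingA i j = 0 ∨ pvRingA i j = 1 ∨ pvRingA i j = 2 := by
  unfold pvRingA; split_ifs <;> simp

lemma pvStones_cases (house : List (List String)) (c : String) :
    ∀ x ∈ pvStones house c, x = 0 ∨ x = 1 ∨ x = 2 := by
  intro x hx
  simp only [pvStones, List.mem_map] at hx
  obtain ⟨p, _, rfl⟩ := hx
  exact pvRingA_cases p.1 p.2

lemma min?_id_eq {r : List Int} {m : Int} (hm : m ∈ r) (hmin : ∀ x ∈ r, m ≤ x) :
    PySem.List.min? r (fun x => x) = some m := by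
  cases h : PySem.List.min? r (fun x => x) with
  | none =>
      rw [PySem.List.min?_eq_none_iff] at h
      subst h; simp at hm
  | some m' =>
      have h1 := PySem.List.min?_mem h
      have h2 := PySem.List.min?_isMin h m hm
      have h3 := hmin m' h1
      simp only [Option.some.injEq]
      omega

-- A's minimum ring in terms of per-ring counts
lemma min?_tri (r : List Int) (hr : ∀ x ∈ r, x = 0 ∨ x = 1 ∨ x = 2) (hne : r ≠ []) :
    PySem.List.min? r (fun x => x)
      = some (if r.count 0 ≠ 0 then (0 : Int) else if r.count 1 ≠ 0 then 1 else 2) := by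
  have hmem : ∀ k : Int, r.count k ≠ 0 ↔ k ∈ r := by
    intro k
    constructor
    · intro h; by_contra hk; exact h (List.count_eq_zero.mpr hk)
    · intro h hc; exact (List.count_eq_zero.mp hc) h
  have hnonneg : ∀ x ∈ r, (0 : Int) ≤ x := by
    intro x hx; rcases hr x hx with rfl | rfl | rfl <;> norm_num
  split_ifs with h0 h1
  · exact min?_id_eq ((hmem 0).mp h0) hnonneg
  · refine min?_id_eq ((hmem 1).mp h1) ?_
    intro x hx
    rcases hr x hx with rfl | rfl | rfl
    · exact absurd ((hmem 0).mpr hx) h0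
    · omega
    · omega
  · have h2 : (2 : Int) ∈ r := by
      cases r with
      | nil => exact absurd rfl hne
      | cons a t =>
          rcases hr a (by simp) with rfl | rfl | rfl
          · exact absurd ((hmem 0).mpr (by simp)) h0
          · exact absurd ((hmem 1).mpr (by simp)) h1
          · simp
    refine min?_id_eq h2 ?_
    intro x hx
    rcases hr x hx with rfl | rfl | rfl
    · exact absurd ((hmem 0).mpr hx) h0
    · exact absurd ((hmem 1).mpr hx) h1
    · omega

lemma cntP_lt_one (r : List Int) (hr : ∀ x ∈ r, x = 0 ∨ x = 1 ∨ x = 2) :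
    r.countP (fun x => decide (x < 1)) = r.count 0 := by
  induction r with
  | nil => rfl
  | cons a t ih =>
      have ha := hr a (by simp)
      have ht := fun x hx => hr x (List.mem_cons_of_mem a hx)
      rw [List.countP_cons, List.count_cons, ih ht]
      rcases ha with rfl | rfl | rfl <;> simp

lemma cntP_lt_two (r : List Int) (hr : ∀ x ∈ r, x = 0 ∨ x = 1 ∨ x = 2) :
    r.countP (fun x => decide (x < 2)) = r.count 0 + r.count 1 := by
  induction r with
  | nil => rfl
  | cons a t ih =>
      have ha := hr a (by simp)
      have ht := fun x hx => hr x (List.mem_cons_of_mem a hx)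
      rw [List.countP_cons, List.count_cons, List.count_cons, ih ht]
      rcases ha with rfl | rfl | rfl <;> simp <;> omega

lemma sum_ite_lt_one (r : List Int) (hr : ∀ x ∈ r, x = 0 ∨ x = 1 ∨ x = 2) :
    (r.map (fun x => if x < (1 : Int) then (1 : Int) else 0)).sum = ((r.count 0 : Nat) : Int) := by
  rw [show (fun x => if x < (1 : Int) then (1 : Int) else 0)
        = (fun x => if decide (x < (1 : Int)) = true then (1 : Int) else 0) from by
      funext x; simp]
  rw [PySem.List.sum_map_ite_one_zero, cntP_lt_one r hr]

lemma sum_ite_lt_two (r : List Int) (hr : ∀ x ∈ r, x = 0 ∨ x = 1 ∨ x = 2) :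
    (r.map (fun x => if x < (2 : Int) then (1 : Int) else 0)).sum
      = ((r.count 0 : Nat) : Int) + ((r.count 1 : Nat) : Int) := by
  rw [show (fun x => if x < (2 : Int) then (1 : Int) else 0)
        = (fun x => if decide (x < (2 : Int)) = true then (1 : Int) else 0) from by
      funext x; simp]
  rw [PySem.List.sum_map_ite_one_zero, cntP_lt_two r hr]
  push_cast; ring

lemma sum_ite_le_one (r : List Int) (hr : ∀ x ∈ r, x = 0 ∨ x = 1 ∨ x = 2) :
    (r.map (fun x => if x ≤ (1 : Int) then (1 : Int) else 0)).sum
      = ((r.count 0 : Nat) : Int) + ((r.count 1 : Nat) : Int) := by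
  rw [show (fun x => if x ≤ (1 : Int) then (1 : Int) else 0)
        = (fun x => if x < (2 : Int) then (1 : Int) else 0) from by
      funext x; exact if_congr (by omega) rfl rfl]
  exact sum_ite_lt_two r hr

lemma A_fold (house : List (List String)) :
    (PySem.List.pyRange 0 5 1).foldl (fun (acc : List Int × List Int) i =>
      (PySem.List.pyRange 0 5 1).foldl (fun (acc : List Int × List Int) j =>
        let cell := PySem.List.pyGetD (PySem.List.pyGetD house i []) j ""
        if cell = "R" then (acc.1 ++ [pvRingA i j], acc.2)
        else if cell = "Y" then (acc.1, acc.2 ++ [pvRingA i j])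
        else acc) acc) ([], [])
    = (pvStones house "R", pvStones house "Y") := by
  have h1 : (PySem.List.pyRange 0 5 1).foldl (fun (acc : List Int × List Int) i =>
      (PySem.List.pyRange 0 5 1).foldl (fun (acc : List Int × List Int) j =>
        let cell := PySem.List.pyGetD (PySem.List.pyGetD house i []) j ""
        if cell = "R" then (acc.1 ++ [pvRingA i j], acc.2)
        else if cell = "Y" then (acc.1, acc.2 ++ [pvRingA i j])
        else acc) acc) ([], [])
      = pvPairs.foldl (pvStepA house) ([], []) :=
    foldl_nested (pvStepA house) (PySem.List.pyRange 0 5 1) (PySem.List.pyRange 0 5 1) ([], [])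
  rw [h1]
  have hsplit : List.foldl (pvStepA house) ([], []) pvPairs
      = List.foldl (fun (s : List Int × List Int) p =>
          (if pvCell house p = "R" then s.1 ++ [pvRingA p.1 p.2] else s.1,
           if pvCell house p = "Y" then s.2 ++ [pvRingA p.1 p.2] else s.2)) ([], []) pvPairs := by
    refine PySem.List.foldl_congr_mem _ _ _ _ ?_
    intro acc p _
    unfold pvStepA
    by_cases hR : pvCell house p = "R"
    · simp [hR]
    · by_cases hY : pvCell house p = "Y"
      · simp [hY]
      · simp [hR, hY]
  rw [hsplit]
  rw [PySem.List.foldl_prod_mk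
      (f := fun (a : List Int) p => if pvCell house p = "R" then a ++ [pvRingA p.1 p.2] else a)
      (g := fun (a : List Int) p => if pvCell house p = "Y" then a ++ [pvRingA p.1 p.2] else a)]
  rw [PySem.List.foldl_append_ite (p := fun p => pvCell house p = "R") (f := fun p => pvRingA p.1 p.2),
      PySem.List.foldl_append_ite (p := fun p => pvCell house p = "Y") (f := fun p => pvRingA p.1 p.2)]
  simp [pvStones]

lemma pvStones_ne_nil (house : List (List String)) (c : String)
    (h : ∃ i < 5, ∃ j < 5, (house.getD i []).getD j "" = c) :
    pvStones house c ≠ [] := by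
  obtain ⟨i, hi, j, hj, hc⟩ := h
  have hmem : ((i : Int), (j : Int)) ∈ pvPairs := by
    interval_cases i <;> interval_cases j <;> decide
  have hcell : pvCell house ((i : Int), (j : Int)) = c := by
    simp only [pvCell]
    simpa [PySem.List.pyGetD_natCast, List.getD_eq_getElem?_getD] using hc
  have : pvRingA (i : Int) (j : Int) ∈ pvStones house c := by
    simp only [pvStones, List.mem_map]
    exact ⟨((i : Int), (j : Int)), List.mem_filter.mpr ⟨hmem, by simp [hcell]⟩, rfl⟩
  exact List.ne_nil_of_mem this

-- B's ring coordinate lists are exactly pvPairs filtered by A's ring value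
lemma rings_eq : pvRingsB =
    [pvPairs.filter (fun p => decide (pvRingA p.1 p.2 = 0)),
     pvPairs.filter (fun p => decide (pvRingA p.1 p.2 = 1)),
     pvPairs.filter (fun p => decide (pvRingA p.1 p.2 = 2))] := by decide

-- a colour's count in B's ring-d layer is the count of ring value d among A's stones
lemma layer_count (house : List (List String)) (c : String) (d : Int) :
    ((pvPairs.filter (fun p => decide (pvRingA p.1 p.2 = d))).map (pvCell house)).count c
      = (pvStones house c).count d := by
  simp only [pvStones, List.count, List.countP_map, List.countP_filter]
  refine List.countP_congr ?_
  intro p _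
  simp only [Function.comp]
  by_cases h1 : pvCell house p = c <;> by_cases h2 : pvRingA p.1 p.2 = d <;>
    simp [h1, h2]

-- a nonempty stone list has a nonzero ring count
lemma count_nonzero (r : List Int) (hr : ∀ x ∈ r, x = 0 ∨ x = 1 ∨ x = 2) (hne : r ≠ []) :
    r.count 0 ≠ 0 ∨ r.count 1 ≠ 0 ∨ r.count 2 ≠ 0 := by
  cases r with
  | nil => exact absurd rfl hne
  | cons a t =>
      rcases hr a (by simp) with rfl | rfl | rfl
      · left; simp
      · right; left; simp
      · right; right; simp

-- ===== VERDICT (by name: the statement is the Claim_ definition above) =====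
set_option maxHeartbeats 1600000 in
theorem score_curling_spec : Claim_equal_score_curling := by
  intro house _ hpre
  obtain ⟨hlen, hrows, hR, hY⟩ := hpre
  have hr3 := pvStones_cases house "R"
  have hy3 := pvStones_cases house "Y"
  have hner := pvStones_ne_nil house "R" hR
  have hney := pvStones_ne_nil house "Y" hY
  unfold Spec_score_curling score_curling score_curling_alt
  rw [A_fold, rings_eq]
  simp only [pvScan]
  simp only [show (fun p : Int × Int => PySem.List.pyGetD (PySem.List.pyGetD house p.1 []) p.2 "")
      = pvCell house from by funext p; rfl]
  simp only [layer_count]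
  rw [min?_tri _ hr3 hner, min?_tri _ hy3 hney]
  have har := count_nonzero _ hr3 hner
  have hay := count_nonzero _ hy3 hney
  by_cases ha0 : (pvStones house "R").count 0 = 0 <;>
    by_cases ha1 : (pvStones house "R").count 1 = 0 <;>
      by_cases hb0 : (pvStones house "Y").count 0 = 0 <;>
        by_cases hb1 : (pvStones house "Y").count 1 = 0 <;>
          simp_all [sum_ite_lt_one _ hr3, sum_ite_lt_one _ hy3,
            sum_ite_le_one _ hr3, sum_ite_le_one _ hy3]
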